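-- pv_equiv track=rewrite | github.com/raginipriyagummadi/AmiseqCodingChallenge | program2.py | mapKeysToData
-- ===== SOURCE A (Python) =====
-- def mapKeysToData(keys, data):
--     # Map the keys to the values in the data and create a dict that has the keychecks.  --- Point 2 and 3
--     output_data = []
--     key_checks = ["Child's First Name", "Gender", "Ethnicity", "Year of Birth", "Rank", "Count"]
--     for val in data['data']:
--         output_data1 = dict()
--         count = 0
--         for key in keys:
--             if key in key_checks:
--                 output_data1[key] = dict()
--                 output_data1[key] = val[count]
--             count += 1
--         output_data.append(output_data1)
--     return output_data
-- ===== SOURCE B (Python) =====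
-- def mapKeysToData(keys, data):
--     key_checks = ["Child's First Name", "Gender", "Ethnicity", "Year of Birth", "Rank", "Count"]
--     rows = data['data']
--     result = [dict() for _ in rows]
--     for i, key in enumerate(keys):
--         if key in key_checks:
--             for d, row in zip(result, rows):
--                 d[key] = row[i]
--     return result
-- ===== Notes on version B (the rewrite author's own statement) =====
-- stated objective: alternative
-- what changed: B interchanges the loops: instead of building each row's dict in an inner loop over keys, it creates one empty dict per row and fills the output column by column, with the outer loop over enumerated keys and the inner loop zipping the result dicts with the rows.
import Mathlib
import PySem

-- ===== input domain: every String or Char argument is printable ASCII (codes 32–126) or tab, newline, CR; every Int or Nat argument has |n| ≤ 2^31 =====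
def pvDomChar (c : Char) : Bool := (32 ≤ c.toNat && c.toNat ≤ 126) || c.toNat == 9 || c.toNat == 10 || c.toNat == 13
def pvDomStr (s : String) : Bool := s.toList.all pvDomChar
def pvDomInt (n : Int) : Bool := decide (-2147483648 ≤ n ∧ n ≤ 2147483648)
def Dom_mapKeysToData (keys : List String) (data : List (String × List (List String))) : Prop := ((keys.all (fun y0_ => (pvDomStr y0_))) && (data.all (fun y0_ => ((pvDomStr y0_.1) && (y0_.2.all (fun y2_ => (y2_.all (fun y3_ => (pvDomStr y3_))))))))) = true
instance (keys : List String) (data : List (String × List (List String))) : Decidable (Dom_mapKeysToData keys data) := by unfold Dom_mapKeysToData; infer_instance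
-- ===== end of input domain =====

-- B interchanges the loops: it creates one empty dict per row and fills the output column by
-- column (outer loop over enumerated keys, inner loop zipping result dicts with rows).

-- the key_checks literal both Pythons carry
def pvKeyChecks : List String :=
  ["Child's First Name", "Gender", "Ethnicity", "Year of Birth", "Rank", "Count"]

-- ===== PORT A =====
-- literal port of A: for each row of data['data'], fold over keys with a counter,
-- inserting key -> val[count] when key ∈ key_checks (the dead 'output_data1[key] = dict()'
-- is immediately overwritten in the Python and is not represented).
-- val[count] is in range under Pre_; outside Pre_ Python raises (pyGetD default never read under Pre_).
def mapKeysToData (keys : List String) (data : List (String × List (List String))) : List (List (String × String)) :=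
  let rows := (List.lookup "data" data).getD []
  rows.foldl (fun output_data val =>
    let st := keys.foldl (fun (st : PySem.Dict String String × Int) key =>
      if pvKeyChecks.contains key then
        (st.1.insert key (PySem.List.pyGetD val st.2 ""), st.2 + 1)
      else
        (st.1, st.2 + 1)) (PySem.Dict.empty, 0)
    output_data ++ [st.1.items]) []

-- ===== PORT B =====
-- literal port of Source B: one empty dict per row, then an outer fold over enumerate(keys)
-- updating every row's dict (zip of result with rows) for each allowed key.
def mapKeysToData_alt (keys : List String) (data : List (String × List (List String))) : List (List (String × String)) :=
  let rows := (List.lookup "data" data).getD []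
  let result : List (PySem.Dict String String) := rows.map (fun _ => PySem.Dict.empty)
  let final := (PySem.List.enumerate keys 0).foldl (fun result p =>
    if pvKeyChecks.contains p.2 then
      List.zipWith (fun d row => d.insert p.2 (PySem.List.pyGetD row p.1 "")) result rows
    else result) result
  final.map PySem.Dict.items

-- ===== PRECONDITION & SPEC =====
-- Pre_ excludes exactly the inputs where Python A raises: a KeyError when 'data' has no
-- "data" key, and an IndexError when some row is too short at a position whose key is allowed.
def Pre_mapKeysToData (keys : List String) (data : List (String × List (List String))) : Prop :=
  (List.lookup "data" data).isSome = true ∧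
  (((List.lookup "data" data).getD []).all (fun row =>
    (PySem.List.enumerate keys 0).all (fun p =>
      !(pvKeyChecks.contains p.2) || decide (p.1 < (row.length : Int))))) = true
instance (keys : List String) (data : List (String × List (List String))) : Decidable (Pre_mapKeysToData keys data) := by unfold Pre_mapKeysToData; infer_instance

def pvWitness_mapKeysToData : List String × (List (String × List (List String))) :=
  (["Gender", "x", "Rank"], [("data", [["a", "b", "c"], ["1", "2", "3"]])])

def Spec_mapKeysToData (keys : List String) (data : List (String × List (List String))) (out : List (List (String × String))) : Prop := out = mapKeysToData_alt keys data
instance (keys : List String) (data : List (String × List (List String))) (out : List (List (String × String))) : Decidable (Spec_mapKeysToData keys data out) := by unfold Spec_mapKeysToData; infer_instance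

-- ===== CLAIM (what is proved, stated in full; the proofs are below) =====
def Claim_equal_mapKeysToData : Prop := ∀ (keys : List String) (data : List (String × List (List String))), Dom_mapKeysToData keys data → Pre_mapKeysToData keys data → Spec_mapKeysToData keys data (mapKeysToData keys data)

-- ===== LEMMAS AND PROOFS =====

-- zipWith of a mapped list with the list itself is a map
theorem pv_zip_map {a b : Type} (g : b → a → b) (f : a → b) :
    ∀ (rows : List a), List.zipWith g (rows.map f) rows = rows.map (fun r => g (f r) r) := by
  intro rows
  induction rows with
  | nil => simp
  | cons r rs ih => simp [ih]

-- loop interchange: folding column updates (skipping disallowed keys) over a list of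
-- per-row dicts equals mapping the per-row fold over the rows
theorem pv_interchange (L : List (Int × String)) (rows : List (List String)) :
    ∀ (f : List String → PySem.Dict String String),
    L.foldl (fun res p =>
        if pvKeyChecks.contains p.2 then
          List.zipWith (fun d row => d.insert p.2 (PySem.List.pyGetD row p.1 "")) res rows
        else res)
      (rows.map f)
    = rows.map (fun row =>
        L.foldl (fun d p =>
          if pvKeyChecks.contains p.2 then d.insert p.2 (PySem.List.pyGetD row p.1 "") else d)
          (f row)) := by
  induction L with
  | nil => intro f; simp
  | cons p L ih =>
    intro f
    by_cases h : pvKeyChecks.contains p.2 = true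
    · simp only [List.foldl_cons, h, if_pos,
        pv_zip_map (fun d row => d.insert p.2 (PySem.List.pyGetD row p.1 "")) f rows]
      exact ih (fun row => (f row).insert p.2 (PySem.List.pyGetD row p.1 ""))
    · simp only [List.foldl_cons, h, Bool.false_eq_true, if_false]
      exact ih f

-- A's inner counter fold over keys equals the fold (skipping disallowed keys) over the enumeration
theorem pv_inner (row : List String) (keys : List String) : ∀ (s : Int) (d : PySem.Dict String String),
    (keys.foldl (fun (st : PySem.Dict String String × Int) key =>
      if pvKeyChecks.contains key then
        (st.1.insert key (PySem.List.pyGetD row st.2 ""), st.2 + 1)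
      else
        (st.1, st.2 + 1)) (d, s)).1
    = (PySem.List.enumerate keys s).foldl
        (fun (d : PySem.Dict String String) p =>
          if pvKeyChecks.contains p.2 then d.insert p.2 (PySem.List.pyGetD row p.1 "") else d) d := by
  induction keys with
  | nil => intro s d; simp [PySem.List.enumerate_nil]
  | cons k ks ih =>
    intro s d
    rw [PySem.List.enumerate_cons]
    by_cases h : pvKeyChecks.contains k = true
    · simp only [List.foldl_cons, h, if_pos]
      exact ih (s + 1) (d.insert k (PySem.List.pyGetD row s ""))
    · simp only [List.foldl_cons, h, Bool.false_eq_true, if_false]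
      exact ih (s + 1) d

-- ===== VERDICT (by name: the statement is the Claim_ definition above) =====
theorem mapKeysToData_spec : Claim_equal_mapKeysToData := by
  intro keys data _ _
  unfold Spec_mapKeysToData mapKeysToData mapKeysToData_alt
  rw [PySem.List.foldl_append_singleton_eq_map]
  simp only [List.nil_append]
  rw [pv_interchange]
  rw [List.map_map]
  apply List.map_congr_left
  intro row _
  simp only [Function.comp]
  rw [pv_inner row keys 0 PySem.Dict.empty]
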